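-- pv_equiv track=rewrite | github.com/shotakoyama/jetan-yans2022 | jetan/align/select.py | split_edit_list
-- ===== SOURCE A (Python) =====
-- def split_edit_list(edit_list, start_list, end_list):
--     assert len(edit_list) == len(start_list) == len(end_list)
--
--     span_list = list(zip(start_list, end_list))
--     block_list = []
--
--     tmp = None
--     for span, edit in zip(span_list, edit_list):
--         if tmp is None or tmp != span:
--             block_list.append([edit])
--         else:
--             block_list[-1].append(edit)
--         tmp = span
--
--     return block_list
-- ===== SOURCE B (Python) =====
-- def split_edit_list(edit_list, start_list, end_list):
--     assert len(edit_list) == len(start_list) == len(end_list)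
--     pairs = list(zip(zip(start_list, end_list), edit_list))
--     n = len(pairs)
--     blocks = []
--     i = 0
--     while i < n:
--         span = pairs[i][0]
--         j = i
--         while j < n and pairs[j][0] == span:
--             j += 1
--         blocks.append([e for _, e in pairs[i:j]])
--         i = j
--     return blocks
-- ===== Notes on version B (the rewrite author's own statement) =====
-- stated objective: alternative
-- what changed: A's per-element state machine (remember previous span, append into block_list[-1]) is replaced by a run-detection scan: for each position find the end of the maximal equal-span run and emit that run's edits as one block at once.
import Mathlib
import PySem

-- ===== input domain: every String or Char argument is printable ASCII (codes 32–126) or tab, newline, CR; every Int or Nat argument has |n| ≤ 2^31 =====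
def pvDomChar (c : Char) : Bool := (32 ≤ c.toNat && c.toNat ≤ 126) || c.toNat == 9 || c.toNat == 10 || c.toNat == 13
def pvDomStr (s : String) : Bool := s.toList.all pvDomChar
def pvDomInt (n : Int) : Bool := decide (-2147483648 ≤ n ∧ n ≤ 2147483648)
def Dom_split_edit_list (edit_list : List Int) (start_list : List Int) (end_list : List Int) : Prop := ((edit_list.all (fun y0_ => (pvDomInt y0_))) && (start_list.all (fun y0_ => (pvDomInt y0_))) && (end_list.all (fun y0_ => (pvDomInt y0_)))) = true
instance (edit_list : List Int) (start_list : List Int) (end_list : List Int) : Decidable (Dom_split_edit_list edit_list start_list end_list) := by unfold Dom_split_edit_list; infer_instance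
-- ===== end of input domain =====

-- B replaces A's previous-span state machine by a maximal-run scan that emits each block at once
-- (objective: alternative decomposition, same O(n) cost).

-- ===== PORT A =====
-- `block_list[-1].append(edit)`: append `e` to the last block (no-op on [], unreachable in A).
def pyAppendLast : List (List Int) → Int → List (List Int)
  | [], _ => []
  | [b], e => [b ++ [e]]
  | b :: rest, e => b :: pyAppendLast rest e

-- one iteration of A's for-loop: state = (tmp, block_list)
def stepA (st : Option (Int × Int) × List (List Int)) (pe : (Int × Int) × Int) :
    Option (Int × Int) × List (List Int) :=
  match st, pe with
  | (tmp, blocks), (span, edit) =>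
    match tmp with
    | none => (some span, blocks ++ [[edit]])
    | some t => if t ≠ span then (some span, blocks ++ [[edit]]) else (some span, pyAppendLast blocks edit)

def split_edit_list (edit_list : List Int) (start_list : List Int) (end_list : List Int) : List (List Int) :=
  -- the assert: inputs of unequal lengths raise AssertionError and are excluded by Pre_
  let span_list := start_list.zip end_list
  ((span_list.zip edit_list).foldl stepA (none, [])).2

-- ===== PORT B =====
-- inner while loop: scan forward from k for the end of the run of `span` (k counts from the list head)
def runLen (pairs : List ((Int × Int) × Int)) (span : Int × Int) (k : Nat) : Nat :=
  if h : k < pairs.length then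
    if (pairs[k]'h).1 = span then runLen pairs span (k + 1) else k
  else k
termination_by pairs.length - k

theorem runLen_ge (pairs : List ((Int × Int) × Int)) (span : Int × Int) (k : Nat) :
    k ≤ runLen pairs span k := by
  unfold runLen
  split
  · split
    · exact Nat.le_trans (Nat.le_succ k) (runLen_ge pairs span (k + 1))
    · exact Nat.le_refl k
  · exact Nat.le_refl k
termination_by pairs.length - k

-- outer while loop: peel one maximal run per recursive step
def chopB (pairs : List ((Int × Int) × Int)) : List (List Int) :=
  match hp : pairs with
  | [] => []
  | p :: _ =>
    let k := runLen pairs p.1 0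
    ((pairs.take k).map (·.2)) :: chopB (pairs.drop k)
termination_by pairs.length
decreasing_by
  have hk : 1 ≤ runLen pairs p.1 0 := by
    subst hp
    unfold runLen
    simp only [List.length_cons]
    rw [dif_pos (Nat.succ_pos _)]
    simp only [List.getElem_cons_zero, if_pos rfl]
    exact runLen_ge _ _ 1
  subst hp
  simp only [List.length_drop, List.length_cons]
  omega

def split_edit_list_alt (edit_list : List Int) (start_list : List Int) (end_list : List Int) : List (List Int) :=
  chopB ((start_list.zip end_list).zip edit_list)

-- ===== PRECONDITION & SPEC =====
-- Pre_ excludes exactly the inputs on which A's assert raises AssertionError (unequal lengths).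
def Pre_split_edit_list (edit_list : List Int) (start_list : List Int) (end_list : List Int) : Prop :=
  edit_list.length = start_list.length ∧ start_list.length = end_list.length
instance (edit_list : List Int) (start_list : List Int) (end_list : List Int) : Decidable (Pre_split_edit_list edit_list start_list end_list) := by unfold Pre_split_edit_list; infer_instance

def pvWitness_split_edit_list : List Int × List Int × List Int := ([1, 2, 3, 4], [0, 0, 1, 1], [2, 2, 3, 5])

def Spec_split_edit_list (edit_list : List Int) (start_list : List Int) (end_list : List Int) (out : List (List Int)) : Prop := out = split_edit_list_alt edit_list start_list end_list
instance (edit_list : List Int) (start_list : List Int) (end_list : List Int) (out : List (List Int)) : Decidable (Spec_split_edit_list edit_list start_list end_list out) := by unfold Spec_split_edit_list; infer_instance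

-- ===== CLAIM (what is proved, stated in full; the proofs are below) =====
def Claim_equal_split_edit_list : Prop := ∀ (edit_list : List Int) (start_list : List Int) (end_list : List Int), Dom_split_edit_list edit_list start_list end_list → Pre_split_edit_list edit_list start_list end_list → Spec_split_edit_list edit_list start_list end_list (split_edit_list edit_list start_list end_list)

-- ===== LEMMAS AND PROOFS =====

-- proof-side generalisation of pyAppendLast: append a whole list to the last block
def appLM : List (List Int) → List Int → List (List Int)
  | [], _ => []
  | [b], xs => [b ++ xs]
  | b :: rest, xs => b :: appLM rest xs

theorem appLM_nil (blocks : List (List Int)) : appLM blocks [] = blocks := by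
  induction blocks with
  | nil => rfl
  | cons b rest ih =>
    cases rest with
    | nil => simp [appLM]
    | cons c t => simpa [appLM] using ih

theorem appLM_cons₂ (b : List Int) (l : List (List Int)) (xs : List Int) (h : l ≠ []) :
    appLM (b :: l) xs = b :: appLM l xs := by
  cases l with
  | nil => exact absurd rfl h
  | cons c t => rfl

theorem pyAppendLast_ne_nil (l : List (List Int)) (e : Int) (h : l ≠ []) :
    pyAppendLast l e ≠ [] := by
  cases l with
  | nil => exact absurd rfl h
  | cons b t => cases t <;> simp [pyAppendLast]

theorem appLM_pyAppendLast : ∀ (blocks : List (List Int)) (e : Int) (xs : List Int),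
    appLM (pyAppendLast blocks e) xs = appLM blocks (e :: xs)
  | [], _, _ => rfl
  | [b], e, xs => by simp [pyAppendLast, appLM]
  | b :: c :: t, e, xs => by
    have h1 : pyAppendLast (b :: c :: t) e = b :: pyAppendLast (c :: t) e := rfl
    rw [h1, appLM_cons₂ _ _ _ (pyAppendLast_ne_nil _ _ (by simp)),
        appLM_cons₂ _ _ _ (by simp), appLM_pyAppendLast (c :: t) e xs]

theorem appLM_append_singleton (blocks : List (List Int)) (b : List Int) (xs : List Int) :
    appLM (blocks ++ [b]) xs = blocks ++ [b ++ xs] := by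
  induction blocks with
  | nil => rfl
  | cons c rest ih =>
    cases rest with
    | nil => simp [appLM]
    | cons d t => simpa [appLM] using ih

def pEq (s : Int × Int) : (Int × Int) × Int → Bool := fun q => decide (q.1 = s)

theorem runLen_eq (pairs : List ((Int × Int) × Int)) (span : Int × Int) (k : Nat) (hk : k ≤ pairs.length) :
    runLen pairs span k = k + ((pairs.drop k).takeWhile (pEq span)).length := by
  unfold runLen
  split
  · rename_i h
    rw [List.drop_eq_getElem_cons h]
    by_cases hs : (pairs[k]'h).1 = span
    · rw [if_pos hs]
      rw [runLen_eq pairs span (k + 1) h]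
      simp only [List.takeWhile_cons, pEq, hs, decide_true, if_true, List.length_cons]
      omega
    · rw [if_neg hs]
      simp [List.takeWhile_cons, pEq, hs]
  · rename_i h
    have : k = pairs.length := by omega
    simp [this]
termination_by pairs.length - k

theorem take_length_takeWhile {α : Type} (p : α → Bool) (l : List α) :
    l.take (l.takeWhile p).length = l.takeWhile p := by
  induction l with
  | nil => rfl
  | cons a t ih =>
    by_cases h : p a
    · simp [List.takeWhile_cons, h, ih]
    · simp [List.takeWhile_cons, h]

theorem drop_length_takeWhile {α : Type} (p : α → Bool) (l : List α) :
    l.drop (l.takeWhile p).length = l.dropWhile p := by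
  induction l with
  | nil => rfl
  | cons a t ih =>
    by_cases h : p a
    · simp [List.takeWhile_cons, List.dropWhile_cons, h, ih]
    · simp [List.takeWhile_cons, List.dropWhile_cons, h]

theorem chopB_cons (s : Int × Int) (e : Int) (rest : List ((Int × Int) × Int)) :
    chopB ((s, e) :: rest) =
      (e :: (rest.takeWhile (pEq s)).map (·.2)) :: chopB (rest.dropWhile (pEq s)) := by
  rw [chopB]
  have hrl : runLen ((s, e) :: rest) s 0 = (rest.takeWhile (pEq s)).length + 1 := by
    rw [runLen_eq _ _ 0 (Nat.zero_le _)]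
    simp [List.takeWhile_cons, pEq]
  simp only [hrl]
  have h1 : (((s, e) :: rest).take ((rest.takeWhile (pEq s)).length + 1)) =
      (s, e) :: rest.take (rest.takeWhile (pEq s)).length := by simp [List.take_succ_cons]
  have h2 : (((s, e) :: rest).drop ((rest.takeWhile (pEq s)).length + 1)) =
      rest.drop (rest.takeWhile (pEq s)).length := by simp [List.drop_succ_cons]
  rw [h1, h2, take_length_takeWhile, drop_length_takeWhile]
  simp

theorem foldA_some (L : List ((Int × Int) × Int)) :
    ∀ (s : Int × Int) (blocks : List (List Int)),
    (L.foldl stepA (some s, blocks)).2 =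
      appLM blocks ((L.takeWhile (pEq s)).map (·.2)) ++ chopB (L.dropWhile (pEq s)) := by
  induction L with
  | nil => intro s blocks; simp [chopB, appLM_nil]
  | cons pe rest ih =>
    intro s blocks
    obtain ⟨sp, ed⟩ := pe
    by_cases hsp : s = sp
    · subst hsp
      simp only [List.foldl_cons, stepA]
      rw [if_neg (fun h => h rfl)]
      rw [ih s (pyAppendLast blocks ed), appLM_pyAppendLast]
      simp [List.takeWhile_cons, List.dropWhile_cons, pEq]
    · simp only [List.foldl_cons, stepA]
      rw [if_pos hsp]
      rw [ih sp (blocks ++ [[ed]]), appLM_append_singleton]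
      have hne : ((sp, ed) : (Int × Int) × Int).1 ≠ s := fun h => hsp h.symm
      have htw : ((((sp, ed) : (Int × Int) × Int) :: rest).takeWhile (pEq s)) = [] := by
        simp [List.takeWhile_cons, pEq, hne]
      have hdw : ((((sp, ed) : (Int × Int) × Int) :: rest).dropWhile (pEq s)) = (sp, ed) :: rest := by
        simp [List.dropWhile_cons, pEq, hne]
      rw [htw, hdw, chopB_cons]
      simp [appLM_nil]

theorem ports_agree (edit_list start_list end_list : List Int) :
    split_edit_list edit_list start_list end_list = split_edit_list_alt edit_list start_list end_list := by
  unfold split_edit_list split_edit_list_alt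
  show (List.foldl stepA (none, []) ((start_list.zip end_list).zip edit_list)).2 =
    chopB ((start_list.zip end_list).zip edit_list)
  cases hz : (start_list.zip end_list).zip edit_list with
  | nil => simp [chopB]
  | cons pe rest =>
    obtain ⟨sp, ed⟩ := pe
    simp only [List.foldl_cons, stepA, List.nil_append]
    rw [foldA_some rest sp [[ed]], chopB_cons]
    have : appLM [[ed]] ((rest.takeWhile (pEq sp)).map (·.2)) =
        [ed :: (rest.takeWhile (pEq sp)).map (·.2)] := by simp [appLM]
    rw [this]
    simp

-- ===== VERDICT (by name: the statement is the Claim_ definition above) =====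
theorem split_edit_list_spec : Claim_equal_split_edit_list := by
  intro edit_list start_list end_list _ _
  unfold Spec_split_edit_list
  exact ports_agree edit_list start_list end_list
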